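-- pv_equiv track=rewrite | github.com/chansoli/NatGen | src/data_preprocessors/semantic_breaking_transformation.py | find_comment_spans
-- ===== SOURCE A (Python) =====
-- from typing import List, Optional, Sequence, Tuple
--
-- CommentSpan = Tuple[int, int]
--
-- def find_comment_spans(code: str) -> List[CommentSpan]:
--     """Locate line and block comment spans so mutations can avoid them."""
--     spans: List[CommentSpan] = []
--     i = 0
--     n = len(code)
--     in_line = False
--     in_block = False
--     in_str = False
--     in_char = False
--     start = 0
--     escape = False
--
--     while i < n:
--         ch = code[i]
--         nxt = code[i + 1] if i + 1 < n else ""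
--
--         if in_line:
--             if ch == "\n":
--                 spans.append((start, i))
--                 in_line = False
--             i += 1
--             continue
--
--         if in_block:
--             if ch == "*" and nxt == "/":
--                 spans.append((start, i + 2))
--                 in_block = False
--                 i += 2
--                 continue
--             i += 1
--             continue
--
--         if in_str:
--             if not escape and ch == "\\":
--                 escape = True
--             elif escape:
--                 escape = False
--             elif ch == '"':
--                 in_str = False
--             i += 1
--             continue
--
--         if in_char:
--             if not escape and ch == "\\":
--                 escape = True
--             elif escape:
--                 escape = False
--             elif ch == "'":
--                 in_char = False
--             i += 1
--             continue
--
--         if ch == "/" and nxt == "/":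
--             start = i
--             in_line = True
--             i += 2
--             continue
--         if ch == "/" and nxt == "*":
--             start = i
--             in_block = True
--             i += 2
--             continue
--         if ch == '"':
--             in_str = True
--             i += 1
--             continue
--         if ch == "'":
--             in_char = True
--             i += 1
--             continue
--         i += 1
--
--     if in_line:
--         spans.append((start, n))
--     if in_block:
--         spans.append((start, n))
--     return spans
-- ===== SOURCE B (Python) =====
-- from typing import List, Tuple
--
-- CommentSpan = Tuple[int, int]
--
--
-- def _skip_literal(code: str, i: int) -> int:
--     """Return the index just past the string/char literal opening at index i."""
--     quote = code[i]
--     i += 1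
--     n = len(code)
--     while i < n:
--         c = code[i]
--         if c == "\\":
--             i += 2
--         elif c == quote:
--             return i + 1
--         else:
--             i += 1
--     return i
--
--
-- def find_comment_spans(code: str) -> List[CommentSpan]:
--     """Locate line and block comment spans so mutations can avoid them."""
--     spans: List[CommentSpan] = []
--     i = 0
--     n = len(code)
--     while i < n:
--         if code.startswith("//", i):
--             j = code.find("\n", i + 2)
--             if j == -1:
--                 spans.append((i, n))
--                 break
--             spans.append((i, j))
--             i = j + 1
--         elif code.startswith("/*", i):
--             j = code.find("*/", i + 2)
--             if j == -1:
--                 spans.append((i, n))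
--                 break
--             spans.append((i, j + 2))
--             i = j + 2
--         elif code[i] == '"' or code[i] == "'":
--             i = _skip_literal(code, i)
--         else:
--             i += 1
--     return spans
-- ===== Notes on version B (the rewrite author's own statement) =====
-- stated objective: idiomatic
-- what changed: Replaces A's character-at-a-time state machine with eight state variables by a token-skipping scanner: at each comment/literal opener it jumps over the whole token at once (str.find for the comment terminator, a small escape-aware skip for string/char literals), so no mode flags or escape state are carried across iterations.
import Mathlib
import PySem

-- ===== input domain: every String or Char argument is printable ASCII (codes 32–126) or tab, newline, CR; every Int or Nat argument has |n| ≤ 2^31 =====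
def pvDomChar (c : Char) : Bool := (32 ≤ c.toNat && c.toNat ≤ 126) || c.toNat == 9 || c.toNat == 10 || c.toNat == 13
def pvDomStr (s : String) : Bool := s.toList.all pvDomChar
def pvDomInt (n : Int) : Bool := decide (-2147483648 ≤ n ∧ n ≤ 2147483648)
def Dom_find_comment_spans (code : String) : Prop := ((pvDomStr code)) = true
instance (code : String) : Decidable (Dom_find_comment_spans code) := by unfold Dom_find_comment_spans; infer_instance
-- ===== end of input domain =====

-- B replaces A's character-at-a-time state machine with eight state variables by a
-- token-skipping scanner (jump over whole literals/comments at once); objective: idiomatic.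

-- ===== PORT A =====
-- A's while-loop, step for step: i plus the four mode flags, start and escape are the loop
-- state; fuel (= n+1 at the call, and i advances by ≥ 1 per step, so it never runs out before
-- i ≥ n) makes the recursion structural; code[i] is cs.getD i (only read under i < n), and
-- nxt is the optional next char (Python's "" sentinel for i+1 ≥ n is none here).
def aLoop (cs : List Char) (n : Nat) :
    Nat → Nat → List (Int × Int) → Bool → Bool → Bool → Bool → Nat → Bool → List (Int × Int)
  | 0, _, spans, inLine, inBlock, _, _, start, _ =>
    (spans ++ (if inLine then [((start : Int), (n : Int))] else []))
      ++ (if inBlock then [((start : Int), (n : Int))] else [])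
  | fuel+1, i, spans, inLine, inBlock, inStr, inChar, start, escape =>
    if i < n then
      if inLine then
        if cs.getD i ' ' = '\n' then
          aLoop cs n fuel (i+1) (spans ++ [((start : Int), (i : Int))]) false inBlock inStr inChar start escape
        else aLoop cs n fuel (i+1) spans inLine inBlock inStr inChar start escape
      else if inBlock then
        if cs.getD i ' ' = '*' ∧ cs[i+1]? = some '/' then
          aLoop cs n fuel (i+2) (spans ++ [((start : Int), (i : Int) + 2)]) inLine false inStr inChar start escape
        else aLoop cs n fuel (i+1) spans inLine inBlock inStr inChar start escape
      else if inStr then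
        if ¬ escape ∧ cs.getD i ' ' = '\\' then
          aLoop cs n fuel (i+1) spans inLine inBlock inStr inChar start true
        else if escape then
          aLoop cs n fuel (i+1) spans inLine inBlock inStr inChar start false
        else if cs.getD i ' ' = '"' then
          aLoop cs n fuel (i+1) spans inLine inBlock false inChar start escape
        else aLoop cs n fuel (i+1) spans inLine inBlock inStr inChar start escape
      else if inChar then
        if ¬ escape ∧ cs.getD i ' ' = '\\' then
          aLoop cs n fuel (i+1) spans inLine inBlock inStr inChar start true
        else if escape then
          aLoop cs n fuel (i+1) spans inLine inBlock inStr inChar start false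
        else if cs.getD i ' ' = '\'' then
          aLoop cs n fuel (i+1) spans inLine inBlock inStr false start escape
        else aLoop cs n fuel (i+1) spans inLine inBlock inStr inChar start escape
      else if cs.getD i ' ' = '/' ∧ cs[i+1]? = some '/' then
        aLoop cs n fuel (i+2) spans true inBlock inStr inChar i escape
      else if cs.getD i ' ' = '/' ∧ cs[i+1]? = some '*' then
        aLoop cs n fuel (i+2) spans inLine true inStr inChar i escape
      else if cs.getD i ' ' = '"' then
        aLoop cs n fuel (i+1) spans inLine inBlock true inChar start escape
      else if cs.getD i ' ' = '\'' then
        aLoop cs n fuel (i+1) spans inLine inBlock inStr true start escape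
      else aLoop cs n fuel (i+1) spans inLine inBlock inStr inChar start escape
    else
      (spans ++ (if inLine then [((start : Int), (n : Int))] else []))
        ++ (if inBlock then [((start : Int), (n : Int))] else [])

def find_comment_spans (code : String) : List (Int × Int) :=
  aLoop code.toList code.toList.length (code.toList.length + 1) 0 [] false false false false 0 false

-- ===== PORT B =====
-- Source B's _skip_literal: jump past the string/char literal; 2 on a backslash, stop after the
-- closing quote (fuel n+1 is enough: i advances every step).
def skipLit (cs : List Char) (n : Nat) (q : Char) : Nat → Nat → Nat
  | 0, i => i
  | fuel+1, i =>
    if i < n then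
      if cs.getD i ' ' = '\\' then skipLit cs n q fuel (i+2)
      else if cs.getD i ' ' = q then i + 1
      else skipLit cs n q fuel (i+1)
    else i

-- hand port of Python's code.find(pat, i) for a NON-EMPTY pat, as Option (none = -1): first
-- index ≥ i where pat occurs (a nonempty pattern can only match at an index < length).
def findFrom (cs pat : List Char) : Nat → Nat → Option Nat
  | 0, _ => none
  | fuel+1, i =>
    if i < cs.length then
      if pat.isPrefixOf (cs.drop i) then some i else findFrom cs pat fuel (i+1)
    else none

-- Source B's main while-loop: startswith("//", i) / ("/*", i) become the two optional-char tests.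
def bLoop (cs : List Char) (n : Nat) : Nat → Nat → List (Int × Int) → List (Int × Int)
  | 0, _, spans => spans
  | fuel+1, i, spans =>
    if i < n then
      if cs.getD i ' ' = '/' ∧ cs[i+1]? = some '/' then
        match findFrom cs ['\n'] (cs.length + 1) (i+2) with
        | some j => bLoop cs n fuel (j+1) (spans ++ [((i : Int), (j : Int))])
        | none => spans ++ [((i : Int), (n : Int))]
      else if cs.getD i ' ' = '/' ∧ cs[i+1]? = some '*' then
        match findFrom cs ['*', '/'] (cs.length + 1) (i+2) with
        | some j => bLoop cs n fuel (j+2) (spans ++ [((i : Int), (j : Int) + 2)])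
        | none => spans ++ [((i : Int), (n : Int))]
      else if cs.getD i ' ' = '"' ∨ cs.getD i ' ' = '\'' then
        bLoop cs n fuel (skipLit cs n (cs.getD i ' ') (n + 1) (i+1)) spans
      else bLoop cs n fuel (i+1) spans
    else spans

def find_comment_spans_alt (code : String) : List (Int × Int) :=
  bLoop code.toList code.toList.length (code.toList.length + 1) 0 []

-- ===== PRECONDITION & SPEC =====
def Spec_find_comment_spans (code : String) (out : List (Int × Int)) : Prop := out = find_comment_spans_alt code
instance (code : String) (out : List (Int × Int)) : Decidable (Spec_find_comment_spans code out) := by unfold Spec_find_comment_spans; infer_instance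

-- ===== CLAIM (what is proved, stated in full; the proofs are below) =====
def Claim_equal_find_comment_spans : Prop := ∀ (code : String), Dom_find_comment_spans code → Spec_find_comment_spans code (find_comment_spans code)

-- ===== LEMMAS AND PROOFS =====

-- downward strong induction on n - i
theorem downRec (n : Nat) (C : Nat → Prop)
    (h : ∀ i, (∀ l, n - l < n - i → C l) → C i) : ∀ i, C i := by
  have key : ∀ m i, n - i ≤ m → C i := by
    intro m
    induction m with
    | zero => intro i hi; exact h i (fun l hl => absurd hl (by omega))
    | succ m ih => intro i hi; exact h i (fun l hl => ih l (by omega))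
  exact fun i => key (n - i) i le_rfl

-- the fuel does not matter as long as it exceeds the remaining distance n - i
theorem skipLit_fuel (cs : List Char) (n : Nat) (q : Char) :
    ∀ f1 f2 i, n - i < f1 → n - i < f2 → skipLit cs n q f1 i = skipLit cs n q f2 i := by
  intro f1
  induction f1 with
  | zero => intro f2 i h1 _; exact absurd h1 (by omega)
  | succ f1 ih =>
    intro f2 i h1 h2
    cases f2 with
    | zero => exact absurd h2 (by omega)
    | succ f2 =>
      simp only [skipLit]
      by_cases hn : i < n
      · rw [if_pos hn, if_pos hn]
        by_cases hb : cs.getD i ' ' = '\\'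
        · rw [if_pos hb, if_pos hb]
          exact ih f2 (i+2) (by omega) (by omega)
        · rw [if_neg hb, if_neg hb]
          by_cases hq : cs.getD i ' ' = q
          · rw [if_pos hq, if_pos hq]
          · rw [if_neg hq, if_neg hq]
            exact ih f2 (i+1) (by omega) (by omega)
      · rw [if_neg hn, if_neg hn]

theorem findFrom_fuel (cs pat : List Char) :
    ∀ f1 f2 i, cs.length - i < f1 → cs.length - i < f2 →
      findFrom cs pat f1 i = findFrom cs pat f2 i := by
  intro f1
  induction f1 with
  | zero => intro f2 i h1 _; exact absurd h1 (by omega)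
  | succ f1 ih =>
    intro f2 i h1 h2
    cases f2 with
    | zero => exact absurd h2 (by omega)
    | succ f2 =>
      simp only [findFrom]
      by_cases hn : i < cs.length
      · rw [if_pos hn, if_pos hn]
        by_cases hp : pat.isPrefixOf (cs.drop i) = true
        · rw [if_pos hp, if_pos hp]
        · rw [if_neg hp, if_neg hp]
          exact ih f2 (i+1) (by omega) (by omega)
      · rw [if_neg hn, if_neg hn]

theorem aLoop_fuel (cs : List Char) (n : Nat) :
    ∀ f1 f2 i spans l b s c st e, n - i < f1 → n - i < f2 →
      aLoop cs n f1 i spans l b s c st e = aLoop cs n f2 i spans l b s c st e := by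
  intro f1
  induction f1 with
  | zero => intro f2 i _ _ _ _ _ _ _ h1 _; exact absurd h1 (by omega)
  | succ f1 ih =>
    intro f2 i spans l b s c st e h1 h2
    cases f2 with
    | zero => exact absurd h2 (by omega)
    | succ f2 =>
      simp only [aLoop]
      by_cases hn : i < n
      · rw [if_pos hn, if_pos hn]
        split_ifs <;> first | rfl | (apply ih <;> omega)
      · rw [if_neg hn, if_neg hn]

theorem findFrom_ge (cs pat : List Char) :
    ∀ f i j, findFrom cs pat f i = some j → i ≤ j := by
  intro f
  induction f with
  | zero => intro i j h; exact absurd h (by simp [findFrom])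
  | succ f ih =>
    intro i j h
    simp only [findFrom] at h
    split at h
    · split at h
      · simp only [Option.some.injEq] at h; omega
      · have := ih (i+1) j h; omega
    · exact absurd h (by simp)

theorem skipLit_ge (cs : List Char) (n : Nat) (q : Char) :
    ∀ f i, i ≤ skipLit cs n q f i := by
  intro f
  induction f with
  | zero => intro i; exact le_rfl
  | succ f ih =>
    intro i
    simp only [skipLit]
    split
    · split
      · exact le_trans (by omega) (ih (i+2))
      · split
        · omega
        · exact le_trans (by omega) (ih (i+1))
    · exact le_rfl

theorem bLoop_fuel (cs : List Char) (n : Nat) :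
    ∀ f1 f2 i spans, n - i < f1 → n - i < f2 →
      bLoop cs n f1 i spans = bLoop cs n f2 i spans := by
  intro f1
  induction f1 with
  | zero => intro f2 i spans h1 _; exact absurd h1 (by omega)
  | succ f1 ih =>
    intro f2 i spans h1 h2
    cases f2 with
    | zero => exact absurd h2 (by omega)
    | succ f2 =>
      simp only [bLoop]
      by_cases hn : i < n
      · rw [if_pos hn, if_pos hn]
        by_cases hl : cs.getD i ' ' = '/' ∧ cs[i+1]? = some '/'
        · rw [if_pos hl, if_pos hl]
          cases hj : findFrom cs ['\n'] (cs.length + 1) (i+2) with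
          | some j =>
            exact ih f2 (j+1) _ (by have := findFrom_ge cs ['\n'] _ _ _ hj; omega)
              (by have := findFrom_ge cs ['\n'] _ _ _ hj; omega)
          | none => dsimp only
        · rw [if_neg hl, if_neg hl]
          by_cases hb : cs.getD i ' ' = '/' ∧ cs[i+1]? = some '*'
          · rw [if_pos hb, if_pos hb]
            cases hj : findFrom cs ['*', '/'] (cs.length + 1) (i+2) with
            | some j =>
              exact ih f2 (j+2) _ (by have := findFrom_ge cs ['*', '/'] _ _ _ hj; omega)
                (by have := findFrom_ge cs ['*', '/'] _ _ _ hj; omega)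
            | none => dsimp only
          · rw [if_neg hb, if_neg hb]
            by_cases hq : cs.getD i ' ' = '"' ∨ cs.getD i ' ' = '\''
            · rw [if_pos hq, if_pos hq]
              exact ih f2 _ _
                (by have := skipLit_ge cs n (cs.getD i ' ') (n+1) (i+1); omega)
                (by have := skipLit_ge cs n (cs.getD i ' ') (n+1) (i+1); omega)
            · rw [if_neg hq, if_neg hq]
              exact ih f2 (i+1) _ (by omega) (by omega)
      · rw [if_neg hn, if_neg hn]

theorem getElem?_eq_getD (cs : List Char) (k : Nat) (h : k < cs.length) :
    cs[k]? = some (cs.getD k ' ') := by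
  rw [List.getD_eq_getElem _ _ h, List.getElem?_eq_getElem h]

-- a one-char pattern is a prefix of cs.drop k exactly when that char is at index k
theorem prefixOpt (cs : List Char) (k : Nat) (c : Char) :
    ([c].isPrefixOf (cs.drop k)) = true ↔ cs[k]? = some c := by
  have h0 : cs[k]? = (cs.drop k)[0]? := by simp [List.getElem?_drop]
  rw [h0]
  cases hd : cs.drop k with
  | nil => simp [List.isPrefixOf_iff_prefix]
  | cons a l =>
    show (c == a && [].isPrefixOf l) = true ↔ _
    simp
    exact eq_comm

-- a two-char pattern is a prefix exactly when its chars are at k and k+1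
theorem prefixOpt2 (cs : List Char) (k : Nat) (a b : Char) :
    ([a, b].isPrefixOf (cs.drop k)) = true ↔ (cs[k]? = some a ∧ cs[k+1]? = some b) := by
  have h0 : cs[k]? = (cs.drop k)[0]? := by simp [List.getElem?_drop]
  have h1 : cs[k+1]? = (cs.drop k)[1]? := by simp [List.getElem?_drop]
  rw [h0, h1]
  cases hd : cs.drop k with
  | nil => simp [List.isPrefixOf_iff_prefix]
  | cons x l =>
    cases l with
    | nil =>
      show (a == x && false) = true ↔ _
      simp
    | cons y m =>
      show (a == x && (b == y && [].isPrefixOf m)) = true ↔ _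
      simp
      constructor
      · rintro ⟨h1, h2⟩; exact ⟨h1.symm, h2.symm⟩
      · rintro ⟨h1, h2⟩; exact ⟨h1.symm, h2.symm⟩

-- A in line-comment mode from k = search for '\n' from k, then back to neutral.
theorem lineLemma (cs : List Char) : ∀ k spans start,
    aLoop cs cs.length (cs.length + 1) k spans true false false false start false =
      (match findFrom cs ['\n'] (cs.length + 1) k with
       | some j => aLoop cs cs.length (cs.length + 1) (j+1) (spans ++ [((start : Int), (j : Int))]) false false false false start false
       | none => spans ++ [((start : Int), (cs.length : Int))]) := by
  refine downRec cs.length (fun k => ∀ spans start,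
    aLoop cs cs.length (cs.length + 1) k spans true false false false start false =
      (match findFrom cs ['\n'] (cs.length + 1) k with
       | some j => aLoop cs cs.length (cs.length + 1) (j+1) (spans ++ [((start : Int), (j : Int))]) false false false false start false
       | none => spans ++ [((start : Int), (cs.length : Int))])) ?_
  intro k ih spans start
  conv_lhs => rw [aLoop]
  conv_rhs => rw [findFrom]
  by_cases hk : k < cs.length
  · rw [if_pos hk, if_pos hk]
    by_cases hc : cs.getD k ' ' = '\n'
    · have hp : (['\n'].isPrefixOf (cs.drop k)) = true :=
        (prefixOpt cs k '\n').mpr (by rw [getElem?_eq_getD cs k hk, hc])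
      simp only [eq_self_iff_true, if_true]
      rw [if_pos hc, if_pos hp,
        aLoop_fuel cs cs.length cs.length (cs.length + 1) (k+1) _ _ _ _ _ _ _ (by omega) (by omega)]
    · have hp : ¬((['\n'].isPrefixOf (cs.drop k)) = true) := fun h => by
        have h2 := (prefixOpt cs k '\n').mp h
        rw [getElem?_eq_getD cs k hk] at h2
        exact hc (Option.some.inj h2)
      simp only [eq_self_iff_true, if_true]
      rw [if_neg hc, if_neg hp,
        aLoop_fuel cs cs.length cs.length (cs.length + 1) (k+1) _ _ _ _ _ _ _ (by omega) (by omega),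
        findFrom_fuel cs ['\n'] cs.length (cs.length + 1) (k+1) (by omega) (by omega)]
      exact ih (k+1) (by omega) spans start
  · rw [if_neg hk, if_neg hk]
    simp

-- A in block-comment mode from k = search for "*/" from k, then back to neutral.
theorem blockLemma (cs : List Char) : ∀ k spans start,
    aLoop cs cs.length (cs.length + 1) k spans false true false false start false =
      (match findFrom cs ['*', '/'] (cs.length + 1) k with
       | some j => aLoop cs cs.length (cs.length + 1) (j+2) (spans ++ [((start : Int), (j : Int) + 2)]) false false false false start false
       | none => spans ++ [((start : Int), (cs.length : Int))]) := by
  refine downRec cs.length (fun k => ∀ spans start,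
    aLoop cs cs.length (cs.length + 1) k spans false true false false start false =
      (match findFrom cs ['*', '/'] (cs.length + 1) k with
       | some j => aLoop cs cs.length (cs.length + 1) (j+2) (spans ++ [((start : Int), (j : Int) + 2)]) false false false false start false
       | none => spans ++ [((start : Int), (cs.length : Int))])) ?_
  intro k ih spans start
  conv_lhs => rw [aLoop]
  conv_rhs => rw [findFrom]
  by_cases hk : k < cs.length
  · rw [if_pos hk, if_pos hk]
    by_cases hc : cs.getD k ' ' = '*' ∧ cs[k+1]? = some '/'
    · have hp : ((['*', '/'].isPrefixOf (cs.drop k)) = true) :=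
        (prefixOpt2 cs k '*' '/').mpr ⟨by rw [getElem?_eq_getD cs k hk, hc.1], hc.2⟩
      simp only [Bool.false_eq_true, if_false, eq_self_iff_true, if_true]
      rw [if_pos hc, if_pos hp,
        aLoop_fuel cs cs.length cs.length (cs.length + 1) (k+2) _ _ _ _ _ _ _ (by omega) (by omega)]
    · have hp : ¬((['*', '/'].isPrefixOf (cs.drop k)) = true) := fun h => by
        have h2 := (prefixOpt2 cs k '*' '/').mp h
        rw [getElem?_eq_getD cs k hk] at h2
        exact hc ⟨Option.some.inj h2.1, h2.2⟩
      simp only [Bool.false_eq_true, if_false, eq_self_iff_true, if_true]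
      rw [if_neg hc, if_neg hp,
        aLoop_fuel cs cs.length cs.length (cs.length + 1) (k+1) _ _ _ _ _ _ _ (by omega) (by omega),
        findFrom_fuel cs ['*', '/'] cs.length (cs.length + 1) (k+1) (by omega) (by omega)]
      exact ih (k+1) (by omega) spans start
  · rw [if_neg hk, if_neg hk]
    simp

-- A in string mode from k (escape clear) lands in neutral mode at skipLit '"' k.
theorem strLemma (cs : List Char) : ∀ k spans start,
    aLoop cs cs.length (cs.length + 1) k spans false false true false start false =
      aLoop cs cs.length (cs.length + 1) (skipLit cs cs.length '"' (cs.length + 1) k) spans false false false false start false := by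
  refine downRec cs.length (fun k => ∀ spans start,
    aLoop cs cs.length (cs.length + 1) k spans false false true false start false =
      aLoop cs cs.length (cs.length + 1) (skipLit cs cs.length '"' (cs.length + 1) k) spans false false false false start false) ?_
  intro k ih spans start
  conv_lhs => rw [aLoop]
  conv_rhs => rw [skipLit]
  by_cases hk : k < cs.length
  · rw [if_pos hk, if_pos hk]
    by_cases hb : cs.getD k ' ' = '\\'
    · simp only [Bool.false_eq_true, eq_self_iff_true, not_true, false_and, not_false_iff,
        true_and, if_false, if_true]
      rw [if_pos hb, if_pos hb,
        aLoop_fuel cs cs.length cs.length (cs.length + 1) (k+1) _ _ _ _ _ _ _ (by omega) (by omega)]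
      conv_lhs => rw [aLoop]
      by_cases hk1 : k + 1 < cs.length
      · rw [if_pos hk1]
        simp only [Bool.false_eq_true, eq_self_iff_true, not_true, false_and, not_false_iff,
          true_and, if_false, if_true]
        rw [aLoop_fuel cs cs.length cs.length (cs.length + 1) (k+2) _ _ _ _ _ _ _
              (by omega) (by omega),
          skipLit_fuel cs cs.length '"' cs.length (cs.length + 1) (k+2) (by omega) (by omega)]
        exact ih (k+2) (by omega) spans start
      · rw [if_neg hk1]
        have hs : skipLit cs cs.length '"' cs.length (k+2) = k+2 := by
          rw [skipLit_fuel cs cs.length '"' cs.length 1 (k+2) (by omega) (by omega), skipLit,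
            if_neg (by omega : ¬(k + 2 < cs.length))]
        rw [hs]
        conv_rhs => rw [aLoop]
        rw [if_neg (by omega : ¬(k + 2 < cs.length))]
    · by_cases hq : cs.getD k ' ' = '"'
      · simp only [Bool.false_eq_true, eq_self_iff_true, not_true, false_and, not_false_iff,
          true_and, if_false, if_true]
        rw [if_neg hb, if_pos hq, if_neg hb, if_pos hq,
          aLoop_fuel cs cs.length cs.length (cs.length + 1) (k+1) _ _ _ _ _ _ _ (by omega) (by omega)]
      · simp only [Bool.false_eq_true, eq_self_iff_true, not_true, false_and, not_false_iff,
          true_and, if_false, if_true]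
        rw [if_neg hb, if_neg hq, if_neg hb, if_neg hq,
          aLoop_fuel cs cs.length cs.length (cs.length + 1) (k+1) _ _ _ _ _ _ _ (by omega) (by omega),
          skipLit_fuel cs cs.length '"' cs.length (cs.length + 1) (k+1) (by omega) (by omega)]
        exact ih (k+1) (by omega) spans start
  · rw [if_neg hk, if_neg hk]
    conv_rhs => rw [aLoop]
    rw [if_neg hk]

-- A in char mode from k (escape clear) lands in neutral mode at skipLit '\'' k.
theorem charLemma (cs : List Char) : ∀ k spans start,
    aLoop cs cs.length (cs.length + 1) k spans false false false true start false =
      aLoop cs cs.length (cs.length + 1) (skipLit cs cs.length '\'' (cs.length + 1) k) spans false false false false start false := by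
  refine downRec cs.length (fun k => ∀ spans start,
    aLoop cs cs.length (cs.length + 1) k spans false false false true start false =
      aLoop cs cs.length (cs.length + 1) (skipLit cs cs.length '\'' (cs.length + 1) k) spans false false false false start false) ?_
  intro k ih spans start
  conv_lhs => rw [aLoop]
  conv_rhs => rw [skipLit]
  by_cases hk : k < cs.length
  · rw [if_pos hk, if_pos hk]
    by_cases hb : cs.getD k ' ' = '\\'
    · simp only [Bool.false_eq_true, eq_self_iff_true, not_true, false_and, not_false_iff,
        true_and, if_false, if_true]
      rw [if_pos hb, if_pos hb,
        aLoop_fuel cs cs.length cs.length (cs.length + 1) (k+1) _ _ _ _ _ _ _ (by omega) (by omega)]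
      conv_lhs => rw [aLoop]
      by_cases hk1 : k + 1 < cs.length
      · rw [if_pos hk1]
        simp only [Bool.false_eq_true, eq_self_iff_true, not_true, false_and, not_false_iff,
          true_and, if_false, if_true]
        rw [aLoop_fuel cs cs.length cs.length (cs.length + 1) (k+2) _ _ _ _ _ _ _
              (by omega) (by omega),
          skipLit_fuel cs cs.length '\'' cs.length (cs.length + 1) (k+2) (by omega) (by omega)]
        exact ih (k+2) (by omega) spans start
      · rw [if_neg hk1]
        have hs : skipLit cs cs.length '\'' cs.length (k+2) = k+2 := by
          rw [skipLit_fuel cs cs.length '\'' cs.length 1 (k+2) (by omega) (by omega), skipLit,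
            if_neg (by omega : ¬(k + 2 < cs.length))]
        rw [hs]
        conv_rhs => rw [aLoop]
        rw [if_neg (by omega : ¬(k + 2 < cs.length))]
    · by_cases hq : cs.getD k ' ' = '\''
      · simp only [Bool.false_eq_true, eq_self_iff_true, not_true, false_and, not_false_iff,
          true_and, if_false, if_true]
        rw [if_neg hb, if_pos hq, if_neg hb, if_pos hq,
          aLoop_fuel cs cs.length cs.length (cs.length + 1) (k+1) _ _ _ _ _ _ _ (by omega) (by omega)]
      · simp only [Bool.false_eq_true, eq_self_iff_true, not_true, false_and, not_false_iff,
          true_and, if_false, if_true]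
        rw [if_neg hb, if_neg hq, if_neg hb, if_neg hq,
          aLoop_fuel cs cs.length cs.length (cs.length + 1) (k+1) _ _ _ _ _ _ _ (by omega) (by omega),
          skipLit_fuel cs cs.length '\'' cs.length (cs.length + 1) (k+1) (by omega) (by omega)]
        exact ih (k+1) (by omega) spans start
  · rw [if_neg hk, if_neg hk]
    conv_rhs => rw [aLoop]
    rw [if_neg hk]

-- in neutral mode A's state machine is B's scanner.
theorem mainLemma (cs : List Char) : ∀ i spans start,
    aLoop cs cs.length (cs.length + 1) i spans false false false false start false =
      bLoop cs cs.length (cs.length + 1) i spans := by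
  refine downRec cs.length (fun i => ∀ spans start,
    aLoop cs cs.length (cs.length + 1) i spans false false false false start false =
      bLoop cs cs.length (cs.length + 1) i spans) ?_
  intro i ih spans start
  conv_lhs => rw [aLoop]
  conv_rhs => rw [bLoop]
  by_cases hk : i < cs.length
  · rw [if_pos hk, if_pos hk]
    simp only [Bool.false_eq_true, if_false]
    by_cases h1 : cs.getD i ' ' = '/' ∧ cs[i+1]? = some '/'
    · rw [if_pos h1, if_pos h1,
        aLoop_fuel cs cs.length cs.length (cs.length + 1) (i+2) _ _ _ _ _ _ _ (by omega) (by omega),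
        lineLemma]
      cases hj : findFrom cs ['\n'] (cs.length + 1) (i+2) with
      | some j =>
        dsimp only
        rw [bLoop_fuel cs cs.length cs.length (cs.length + 1) (j+1) _
              (by have := findFrom_ge cs ['\n'] _ _ _ hj; omega)
              (by have := findFrom_ge cs ['\n'] _ _ _ hj; omega)]
        exact ih (j+1) (by have := findFrom_ge cs ['\n'] _ _ _ hj; omega) _ _
      | none => dsimp only
    · rw [if_neg h1, if_neg h1]
      by_cases h2 : cs.getD i ' ' = '/' ∧ cs[i+1]? = some '*'
      · rw [if_pos h2, if_pos h2,
          aLoop_fuel cs cs.length cs.length (cs.length + 1) (i+2) _ _ _ _ _ _ _ (by omega) (by omega),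
          blockLemma]
        cases hj : findFrom cs ['*', '/'] (cs.length + 1) (i+2) with
        | some j =>
          dsimp only
          rw [bLoop_fuel cs cs.length cs.length (cs.length + 1) (j+2) _
                (by have := findFrom_ge cs ['*', '/'] _ _ _ hj; omega)
                (by have := findFrom_ge cs ['*', '/'] _ _ _ hj; omega)]
          exact ih (j+2) (by have := findFrom_ge cs ['*', '/'] _ _ _ hj; omega) _ _
        | none => dsimp only
      · rw [if_neg h2, if_neg h2]
        by_cases h3 : cs.getD i ' ' = '"'
        · rw [if_pos h3, if_pos (Or.inl h3),
            aLoop_fuel cs cs.length cs.length (cs.length + 1) (i+1) _ _ _ _ _ _ _ (by omega) (by omega),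
            strLemma, h3,
            bLoop_fuel cs cs.length cs.length (cs.length + 1) _ _
              (by have := skipLit_ge cs cs.length '"' (cs.length + 1) (i+1); omega)
              (by have := skipLit_ge cs cs.length '"' (cs.length + 1) (i+1); omega)]
          exact ih (skipLit cs cs.length '"' (cs.length + 1) (i+1))
            (by have := skipLit_ge cs cs.length '"' (cs.length + 1) (i+1); omega) _ _
        · rw [if_neg h3]
          by_cases h4 : cs.getD i ' ' = '\''
          · rw [if_pos h4, if_pos (Or.inr h4),
              aLoop_fuel cs cs.length cs.length (cs.length + 1) (i+1) _ _ _ _ _ _ _ (by omega) (by omega),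
              charLemma, h4,
              bLoop_fuel cs cs.length cs.length (cs.length + 1) _ _
                (by have := skipLit_ge cs cs.length '\'' (cs.length + 1) (i+1); omega)
                (by have := skipLit_ge cs cs.length '\'' (cs.length + 1) (i+1); omega)]
            exact ih (skipLit cs cs.length '\'' (cs.length + 1) (i+1))
              (by have := skipLit_ge cs cs.length '\'' (cs.length + 1) (i+1); omega) _ _
          · rw [if_neg h4, if_neg (by tauto : ¬(cs.getD i ' ' = '"' ∨ cs.getD i ' ' = '\'')),
              aLoop_fuel cs cs.length cs.length (cs.length + 1) (i+1) _ _ _ _ _ _ _ (by omega) (by omega),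
              bLoop_fuel cs cs.length cs.length (cs.length + 1) (i+1) _ (by omega) (by omega)]
            exact ih (i+1) (by omega) _ _
  · rw [if_neg hk, if_neg hk]
    simp

-- ===== VERDICT (by name: the statement is the Claim_ definition above) =====
theorem find_comment_spans_spec : Claim_equal_find_comment_spans := by
  intro code _
  unfold Spec_find_comment_spans find_comment_spans find_comment_spans_alt
  exact mainLemma code.toList 0 [] 0
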